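-- pv_equiv track=rewrite | github.com/zig-for/ALttPEntranceRandomizer | Utils.py | parse_player_names
-- ===== SOURCE A (Python) =====
-- def parse_player_names(names, players, teams):
--     names = tuple(n for n in (n.strip() for n in names.split(",")) if n)
--     ret = []
--     while names or len(ret) < teams:
--         team = [n[:16] for n in names[:players]]
--         # where does the 16 character limit come from?
--         while len(team) != players:
--             team.append(f"Player {len(team) + 1}")
--         ret.append(team)
--
--         names = names[players:]
--     return ret
-- ===== SOURCE B (Python) =====
-- def parse_player_names(names, players, teams):
--     cleaned = [n for n in (part.strip() for part in names.split(",")) if n]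
--     num_teams = max(teams, -(-len(cleaned) // players))
--     return [
--         [cleaned[t * players + i][:16] if t * players + i < len(cleaned)
--          else f"Player {i + 1}"
--          for i in range(players)]
--         for t in range(num_teams)
--     ]
-- ===== Notes on version B (the rewrite author's own statement) =====
-- stated objective: alternative
-- what changed: Replaces A's dynamic while-loop that repeatedly slices off the front of the name tuple and pads each team with an inner while, by computing the team count up front (max(teams, ceil(len/players))) and building the whole result with an index-driven double comprehension over range().
-- outside the precondition, e.g. on parse_player_names('', 0, 2): A returns [[], []], B raises ZeroDivisionError
import Mathlib
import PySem

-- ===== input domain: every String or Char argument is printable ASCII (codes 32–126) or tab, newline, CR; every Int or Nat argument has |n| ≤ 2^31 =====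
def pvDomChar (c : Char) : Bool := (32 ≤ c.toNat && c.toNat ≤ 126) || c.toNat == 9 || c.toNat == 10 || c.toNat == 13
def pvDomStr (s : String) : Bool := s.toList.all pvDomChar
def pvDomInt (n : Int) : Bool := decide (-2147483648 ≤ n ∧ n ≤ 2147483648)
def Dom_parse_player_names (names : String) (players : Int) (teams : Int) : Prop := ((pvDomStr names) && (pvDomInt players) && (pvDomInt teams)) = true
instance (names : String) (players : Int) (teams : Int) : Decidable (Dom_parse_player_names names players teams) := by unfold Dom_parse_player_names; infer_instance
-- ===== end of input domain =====

-- B replaces A's while-loops by a precomputed team count and an index-driven double comprehension (objective: alternative decomposition).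

-- ===== PORT A =====
-- shared helper: the cleaned name list (split on ',', strip, drop empties) — identical in both Pythons;
-- split? is some here since the separator "," is nonempty, so .getD [] is exact
def pvCleaned (names : String) : List String :=
  (((PySem.Str.split? names ",").getD []).map PySem.Str.strip).filter (fun n => n ≠ "")

-- n[:16]
def pvTrunc (n : String) : String := PySem.Str.slice n none (some 16)

-- inner 'while len(team) != players: team.append(...)'; fuel only guards totality (enough fuel is supplied for players ≥ 1)
def pvPad (players : Int) : List String → Nat → List String
  | team, 0 => team
  | team, fuel+1 =>
    if (team.length : Int) ≠ players then
      pvPad players (team ++ ["Player " ++ PySem.Int.toStr ((team.length : Int) + 1)]) fuel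
    else team

-- outer 'while names or len(ret) < teams'; fuel only guards totality (A diverges for players ≤ 0, outside Pre_)
def pvLoopA (players teams : Int) : List String → List (List String) → Nat → List (List String)
  | _, ret, 0 => ret
  | names, ret, fuel+1 =>
    if names ≠ [] ∨ (ret.length : Int) < teams then
      pvLoopA players teams (PySem.List.slice names (some players) none)
        (ret ++ [pvPad players ((PySem.List.slice names none (some players)).map pvTrunc) players.toNat]) fuel
    else ret

def parse_player_names (names : String) (players : Int) (teams : Int) : List (List String) :=
  let cleaned := pvCleaned names
  pvLoopA players teams cleaned [] (cleaned.length + teams.toNat + 1)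

-- ===== PORT B =====
-- the double comprehension of Source B; cleaned[t*players+i] is guarded by the if, so pyGetD with default "" is exact
def pvRowsB (players : Int) (cleaned : List String) (numTeams : Int) : List (List String) :=
  (PySem.List.pyRange 0 numTeams 1).map (fun t =>
    (PySem.List.pyRange 0 players 1).map (fun i =>
      if t * players + i < (cleaned.length : Int) then
        pvTrunc (PySem.List.pyGetD cleaned (t * players + i) "")
      else "Player " ++ PySem.Int.toStr (i + 1)))

def parse_player_names_alt (names : String) (players : Int) (teams : Int) : List (List String) :=
  let cleaned := pvCleaned names
  -- num_teams = max(teams, -(-len(cleaned) // players))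
  pvRowsB players cleaned (max teams (-(PySem.Int.floordiv (-(cleaned.length : Int)) players)))

-- ===== PRECONDITION & SPEC =====
-- Pre_ requires players ≥ 1: for players ≤ 0, A diverges on every input except the degenerate
-- ones with no cleaned names where it returns empty teams while B's ceil division raises ZeroDivisionError.
def Pre_parse_player_names (names : String) (players : Int) (teams : Int) : Prop := 1 ≤ players
instance (names : String) (players : Int) (teams : Int) : Decidable (Pre_parse_player_names names players teams) := by unfold Pre_parse_player_names; infer_instance
def pvWitness_parse_player_names : String × Int × Int := ("alpha, beta ,,gamma", 2, 3)

def Spec_parse_player_names (names : String) (players : Int) (teams : Int) (out : List (List String)) : Prop := out = parse_player_names_alt names players teams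
instance (names : String) (players : Int) (teams : Int) (out : List (List String)) : Decidable (Spec_parse_player_names names players teams out) := by unfold Spec_parse_player_names; infer_instance

-- ===== CLAIM (what is proved, stated in full; the proofs are below) =====
def Claim_equal_parse_player_names : Prop := ∀ (names : String) (players : Int) (teams : Int), Dom_parse_player_names names players teams → Pre_parse_player_names names players teams → Spec_parse_player_names names players teams (parse_player_names names players teams)

-- ===== LEMMAS AND PROOFS =====

-- proof-only helpers
def pvRow (p : Int) (xs : List String) (t : Int) : List String :=
  (PySem.List.pyRange 0 p 1).map (fun i =>
    if t * p + i < (xs.length : Int) then pvTrunc (PySem.List.pyGetD xs (t * p + i) "")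
    else "Player " ++ PySem.Int.toStr (i + 1))

def pvCdiv (p : Int) (xs : List String) : Int := -(PySem.Int.floordiv (-(xs.length : Int)) p)

def pvTeamA (p : Int) (xs : List String) : List String :=
  pvPad p ((PySem.List.slice xs none (some p)).map pvTrunc) p.toNat

theorem pvRowsB_eq_map (p : Int) (xs : List String) (N : Int) :
    pvRowsB p xs N = (PySem.List.pyRange 0 N 1).map (pvRow p xs) := rfl

theorem pvCdiv_bounds (p : Int) (hp : 1 ≤ p) (xs : List String) :
    (pvCdiv p xs - 1) * p < (xs.length : Int) ∧ (xs.length : Int) ≤ pvCdiv p xs * p :=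
  (PySem.Int.neg_floordiv_neg_eq_iff_of_pos (by omega)).mp rfl

theorem pvCdiv_nil (p : Int) (hp : 1 ≤ p) (xs : List String) (h : xs.length = 0) :
    pvCdiv p xs = 0 := by
  simp [pvCdiv, h, PySem.Int.floordiv_eq_ediv_of_pos (show (0:Int) < p by omega)]

-- pad characterization
def pvDefaults (base n : Nat) : List String :=
  (List.range n).map (fun (j : Nat) => "Player " ++ PySem.Int.toStr ((base : Int) + (j : Int) + 1))

theorem length_pvDefaults (base n : Nat) : (pvDefaults base n).length = n := by
  simp [pvDefaults]

theorem pvDefaults_succ (base n : Nat) :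
    pvDefaults base (n + 1)
      = ("Player " ++ PySem.Int.toStr ((base : Int) + 1)) :: pvDefaults (base + 1) n := by
  unfold pvDefaults
  rw [List.range_succ_eq_map, List.map_cons, List.map_map]
  refine congrArg₂ List.cons (by norm_num) ?_
  apply List.map_congr_left
  intro a _
  simp only [Function.comp_apply]
  congr 1
  push_cast
  ring

theorem pvPad_eq (p : Int) : ∀ (fuel : Nat) (team : List String),
    (team.length : Int) ≤ p → p.toNat ≤ team.length + fuel →
    pvPad p team fuel = team ++ pvDefaults team.length (p.toNat - team.length) := by
  intro fuel
  induction fuel with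
  | zero =>
    intro team h1 h2
    have h0 : p.toNat - team.length = 0 := by omega
    simp [pvPad, h0, pvDefaults]
  | succ n ih =>
    intro team h1 h2
    by_cases he : (team.length : Int) = p
    · have h0 : p.toNat - team.length = 0 := by omega
      simp [pvPad, he, h0, pvDefaults]
    · have hlt : (team.length : Int) < p := lt_of_le_of_ne h1 he
      rw [pvPad, if_pos he]
      rw [ih (team ++ ["Player " ++ PySem.Int.toStr ((team.length : Int) + 1)])
            (by simp; omega) (by simp; omega)]
      have hsub : p.toNat - team.length = (p.toNat - (team.length + 1)) + 1 := by omega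
      rw [hsub, pvDefaults_succ]
      simp [List.append_assoc]

-- row 0 is A's team
theorem pvRow_zero (p : Int) (hp : 1 ≤ p) (xs : List String) :
    pvRow p xs 0 = pvTeamA p xs := by
  have hp0 : (0:Int) ≤ p := by omega
  unfold pvTeamA
  rw [PySem.List.slice_to xs hp0]
  set m : Nat := min p.toNat xs.length with hm
  have hlen : ((List.take p.toNat xs).map pvTrunc).length = m := by simp [hm]
  rw [pvPad_eq p p.toNat _ (by rw [hlen]; omega) (by rw [hlen]; omega)]
  rw [hlen]
  apply List.ext_getElem
  · simp [pvRow, PySem.List.length_pyRange_one, hlen, length_pvDefaults]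
    omega
  · intro i hi1 hi2
    have hiP : i < p.toNat := by
      simpa [pvRow, PySem.List.length_pyRange_one] using hi1
    simp only [pvRow]
    rw [List.getElem_map, PySem.List.getElem_pyRange_one]
    simp only [zero_mul, zero_add]
    by_cases hc : (i : Int) < (xs.length : Int)
    · rw [if_pos hc]
      have him : i < m := by omega
      rw [List.getElem_append_left (by rw [hlen]; exact him)]
      rw [List.getElem_map, List.getElem_take]
      rw [PySem.List.pyGetD_eq_getElem xs "" (by omega) hc]
      simp
    · rw [if_neg hc]
      rw [List.getElem_append_right (by rw [hlen]; omega)]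
      unfold pvDefaults
      rw [List.getElem_map, List.getElem_range]
      congr 2
      rw [hlen]
      have hmx : m = xs.length := by omega
      push_cast [hmx]
      omega

-- shifting a row down one team = dropping the first `players` names
theorem pvRow_shift (p : Int) (hp : 1 ≤ p) (xs : List String) (t : Int) (ht : 0 ≤ t) :
    pvRow p xs (t + 1) = pvRow p (xs.drop p.toNat) t := by
  unfold pvRow
  apply List.map_congr_left
  intro i hi
  rw [PySem.List.mem_pyRange_one] at hi
  obtain ⟨hi0, hip⟩ := hi
  have hA0 : 0 ≤ t * p + i := by
    have := mul_nonneg ht (by omega : (0:Int) ≤ p)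
    omega
  have hexp : (t + 1) * p + i = (t * p + i) + p := by ring
  by_cases hbig : p.toNat ≤ xs.length
  · have hlen2 : ((xs.drop p.toNat).length : Int) = (xs.length : Int) - p := by
      simp [List.length_drop]
      omega
    rw [hlen2, hexp]
    by_cases hc : t * p + i < (xs.length : Int) - p
    · rw [if_pos hc, if_pos (by omega : (t * p + i) + p < (xs.length : Int))]
      congr 1
      rw [PySem.List.pyGetD_eq_getElem _ "" (by omega) (by omega),
          PySem.List.pyGetD_eq_getElem _ "" hA0 (by omega)]
      rw [List.getElem_drop]
      congr 1
      omega
    · rw [if_neg hc, if_neg (by omega : ¬ ((t * p + i) + p < (xs.length : Int)))]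
  · have hlen2 : ((xs.drop p.toNat).length : Int) = 0 := by
      simp
      omega
    rw [hlen2, hexp]
    rw [if_neg (by omega : ¬ (t * p + i < (0:Int))),
        if_neg (by omega : ¬ ((t * p + i) + p < (xs.length : Int)))]

-- team-count step: one team is consumed
theorem pvCdiv_step (p : Int) (hp : 1 ≤ p) (xs : List String) (hne : xs ≠ []) :
    pvCdiv p xs = pvCdiv p (xs.drop p.toNat) + 1 := by
  have hb := pvCdiv_bounds p hp (xs.drop p.toNat)
  have hlen : (xs.drop p.toNat).length = xs.length - p.toNat := by simp
  have hx0 : 0 < xs.length := List.length_pos_iff.mpr hne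
  rw [pvCdiv]
  rw [PySem.Int.neg_floordiv_neg_eq_iff_of_pos (by omega : (0:Int) < p)]
  rw [hlen] at hb
  by_cases hbig : p.toNat ≤ xs.length
  · constructor
    · have h1 := hb.1
      have hc : ((xs.length - p.toNat : Nat) : Int) = (xs.length : Int) - p := by
        push_cast [hbig]
        omega
      rw [hc] at h1
      nlinarith [h1]
    · have h2 := hb.2
      have hc : ((xs.length - p.toNat : Nat) : Int) = (xs.length : Int) - p := by
        push_cast [hbig]
        omega
      rw [hc] at h2
      nlinarith [h2]
  · -- fewer names than one team: the dropped list is empty, cdiv of it is 0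
    have hz : (xs.drop p.toNat).length = 0 := by omega
    have h0 : pvCdiv p (xs.drop p.toNat) = 0 := pvCdiv_nil p hp _ hz
    rw [h0]
    norm_num
    constructor
    · omega
    · have : (xs.length : Int) < p := by omega
      omega

theorem pvCdiv_nonneg (p : Int) (hp : 1 ≤ p) (xs : List String) : 0 ≤ pvCdiv p xs := by
  have hb := pvCdiv_bounds p hp xs
  nlinarith [hb.1, hb.2]

-- the max(k, ceil) recurrence
theorem pvNT_step (p : Int) (hp : 1 ≤ p) (xs : List String) (k : Int)
    (h : xs ≠ [] ∨ 0 < k) :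
    max k (pvCdiv p xs) = max (k - 1) (pvCdiv p (xs.drop p.toNat)) + 1 := by
  rcases List.eq_nil_or_concat' xs with hnil | _
  · subst hnil
    have hk : 0 < k := h.resolve_left (by simp)
    rw [pvCdiv_nil p hp [] rfl, pvCdiv_nil p hp ([].drop p.toNat) (by simp)]
    omega
  · by_cases hne : xs = []
    · subst hne
      have hk : 0 < k := h.resolve_left (by simp)
      rw [pvCdiv_nil p hp [] rfl, pvCdiv_nil p hp ([].drop p.toNat) (by simp)]
      omega
    · rw [pvCdiv_step p hp xs hne]
      have := pvCdiv_nonneg p hp (xs.drop p.toNat)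
      omega

-- peeling one team off B's comprehension
theorem pvRowsB_step (p : Int) (hp : 1 ≤ p) (xs : List String) (k : Int)
    (h : xs ≠ [] ∨ 0 < k) :
    pvRowsB p xs (max k (pvCdiv p xs))
      = pvTeamA p xs :: pvRowsB p (xs.drop p.toNat) (max (k - 1) (pvCdiv p (xs.drop p.toNat))) := by
  set N : Int := max k (pvCdiv p xs) with hN
  have hN1 : 1 ≤ N := by
    rcases h with hne | hk
    · have hb := pvCdiv_bounds p hp xs
      have hx0 : 0 < xs.length := List.length_pos_iff.mpr hne
      have : 1 ≤ pvCdiv p xs := by nlinarith [hb.2]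
      omega
    · omega
  rw [pvRowsB_eq_map, PySem.List.pyRange_one_cons (by omega : (0:Int) < N), List.map_cons]
  rw [pvRow_zero p hp xs]
  congr 1
  rw [pvRowsB_eq_map]
  have hshift : N - 1 = max (k - 1) (pvCdiv p (xs.drop p.toNat)) := by
    have := pvNT_step p hp xs k h
    omega
  rw [← hshift]
  rw [PySem.List.pyRange_one, PySem.List.pyRange_one, List.map_map, List.map_map]
  have harg : ((N - 1) - 0).toNat = (N - 1).toNat := by omega
  rw [harg]
  apply List.map_congr_left
  intro j _
  simp only [Function.comp_apply, zero_add]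
  have : (1 : Int) + (j : Int) = (j : Int) + 1 := by ring
  rw [this]
  exact pvRow_shift p hp xs (j : Int) (by omega)

-- the main loop invariant
theorem pvLoop_eq (p teams : Int) (hp : 1 ≤ p) :
    ∀ (fuel : Nat) (xs : List String) (ret : List (List String)),
      xs.length + (teams - ret.length).toNat < fuel →
      pvLoopA p teams xs ret fuel
        = ret ++ pvRowsB p xs (max (teams - (ret.length : Int)) (pvCdiv p xs)) := by
  intro fuel
  induction fuel with
  | zero => intro xs ret hf; omega
  | succ n ih =>
    intro xs ret hf
    by_cases hcond : xs ≠ [] ∨ (ret.length : Int) < teams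
    · rw [pvLoopA, if_pos hcond]
      rw [PySem.List.slice_from xs (by omega : (0:Int) ≤ p)]
      have hx : xs ≠ [] → 0 < xs.length := fun h => List.length_pos_iff.mpr h
      have hdrop : (xs.drop p.toNat).length = xs.length - p.toNat := by simp
      have hp1 : 1 ≤ p.toNat := by omega
      have hmeas : (xs.drop p.toNat).length + (teams - ((ret ++ [pvPad p ((PySem.List.slice xs none (some p)).map pvTrunc) p.toNat]).length : Int)).toNat < n := by
        simp only [List.length_append, List.length_cons, List.length_nil]
        rcases hcond with hne | hlt
        · have := hx hne
          push_cast
          omega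
        · push_cast
          omega
      rw [ih _ _ hmeas]
      have hteam : pvPad p ((PySem.List.slice xs none (some p)).map pvTrunc) p.toNat = pvTeamA p xs := rfl
      rw [hteam]
      have hk : xs ≠ [] ∨ 0 < teams - (ret.length : Int) := by
        rcases hcond with hne | hlt
        · exact Or.inl hne
        · exact Or.inr (by omega)
      rw [pvRowsB_step p hp xs (teams - (ret.length : Int)) hk]
      have hlenr : ((ret ++ [pvTeamA p xs]).length : Int) = (ret.length : Int) + 1 := by
        push_cast
        simp
      rw [hlenr]
      have harg : teams - ((ret.length : Int) + 1) = teams - (ret.length : Int) - 1 := by ring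
      rw [harg]
      simp
    · rw [pvLoopA, if_neg hcond]
      push_neg at hcond
      obtain ⟨hnil, hge⟩ := hcond
      have h0 : pvCdiv p xs = 0 := pvCdiv_nil p hp xs (by simp [hnil])
      rw [h0]
      have hmax : max (teams - (ret.length : Int)) 0 ≤ 0 := by omega
      rw [pvRowsB_eq_map, PySem.List.pyRange_one_eq_nil (by omega : max (teams - (ret.length : Int)) (0:Int) ≤ 0)]
      simp

theorem pv_main2 (cleaned : List String) (players teams : Int) (hp : 1 ≤ players) :
    pvLoopA players teams cleaned [] (cleaned.length + teams.toNat + 1)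
      = pvRowsB players cleaned (max teams (-(PySem.Int.floordiv (-(cleaned.length : Int)) players))) := by
  rw [pvLoop_eq players teams hp _ cleaned [] (by simp)]
  have h1 : teams - (([] : List (List String)).length : Int) = teams := by simp
  rw [h1]
  rfl

-- ===== VERDICT (by name: the statement is the Claim_ definition above) =====
theorem parse_player_names_spec : Claim_equal_parse_player_names := by
  intro names players teams _ hp
  unfold Spec_parse_player_names parse_player_names parse_player_names_alt
  exact pv_main2 (pvCleaned names) players teams hp
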